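-- pv_equiv track=rewrite | github.com/PyRo1121/Intel-Dashboard | openclaw/scripts/fetch-aviation-intel.py | classify_military_callsign
-- ===== SOURCE A (Python) =====
-- MIL_CALLSIGN_PREFIXES = [
--     ("RCH", "US Military Airlift"),
--     ("REACH", "US Military Airlift"),
--     ("DOOM", "B-52/Bomber"),
--     ("DEATH", "B-52/Bomber"),
--     ("JAKE", "Tanker/Strategic"),
--     ("NUKE", "Tanker/Strategic"),
--     ("EPIC", "Mil Callsign"),
--     ("IRON", "Mil Callsign"),
--     ("NATO", "NATO"),
--     ("FORTE", "Global Hawk ISR"),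
--     ("DUKE", "US Army"),
--     ("MOOSE", "C-17 Airlift"),
--     ("BISON", "C-5M Galaxy"),
--     ("SNTRY", "E-3 AWACS"),
--     ("DRAGN", "RC-135 Recon"),
--     ("GORDO", "P-8A Poseidon"),
--     ("PLNKN", "SIGINT"),
--     ("TOPCT", "E-6B Mercury"),
--     ("SCORE", "Strategic Tanker"),
--     ("HAVOC", "Attack Helo"),
--     ("VIPER", "F-16/Fighter"),
--     ("RAPTOR", "F-22"),
--     ("BONES", "B-1B Lancer"),
--     ("GHOST", "B-2 Spirit"),
--     ("SPAR", "USAF VIP/Government"),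
--     ("SAM0", "Special Air Mission"),
--     ("SAM1", "Special Air Mission"),
--     ("SAM2", "Special Air Mission"),
--     ("SAM3", "Special Air Mission"),
--     ("SAM4", "Special Air Mission"),
--     ("SAM5", "Special Air Mission"),
--     ("SAM6", "Special Air Mission"),
--     ("SAM7", "Special Air Mission"),
--     ("SAM8", "Special Air Mission"),
--     ("SAM9", "Special Air Mission"),
--     ("EXEC1", "Executive Flight"),
--     ("VENUS", "USAF KC-135"),
--     ("PACK", "USMC Airlift"),
--     ("EVAC", "Aeromedical Evacuation"),
-- ]
--
-- def classify_military_callsign(callsign: str):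
--     upper = callsign.strip().upper()
--     if not upper:
--         return None
--     for prefix, desc in MIL_CALLSIGN_PREFIXES:
--         if upper.startswith(prefix):
--             return (prefix, desc)
--     return None
-- ===== SOURCE B (Python) =====
-- # B: the prefix table is stored as packed records (prefix, '=', description) parsed
-- # once into a hash map, and classification walks the first few characters of the
-- # callsign, growing a candidate head and looking it up incrementally (no scan over
-- # the 40 prefixes per call).  Correct because no listed prefix is a prefix of
-- # another, so at most one prefix can match, and the shortest-first order agrees
-- # with A's list order.
-- _MIL_DATA = (
--     "RCH=US Military Airlift", "REACH=US Military Airlift",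
--     "DOOM=B-52/Bomber", "DEATH=B-52/Bomber",
--     "JAKE=Tanker/Strategic", "NUKE=Tanker/Strategic",
--     "EPIC=Mil Callsign", "IRON=Mil Callsign",
--     "NATO=NATO", "FORTE=Global Hawk ISR",
--     "DUKE=US Army", "MOOSE=C-17 Airlift",
--     "BISON=C-5M Galaxy", "SNTRY=E-3 AWACS",
--     "DRAGN=RC-135 Recon", "GORDO=P-8A Poseidon",
--     "PLNKN=SIGINT", "TOPCT=E-6B Mercury",
--     "SCORE=Strategic Tanker", "HAVOC=Attack Helo",
--     "VIPER=F-16/Fighter", "RAPTOR=F-22",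
--     "BONES=B-1B Lancer", "GHOST=B-2 Spirit",
--     "SPAR=USAF VIP/Government",
--     "SAM0=Special Air Mission", "SAM1=Special Air Mission",
--     "SAM2=Special Air Mission", "SAM3=Special Air Mission",
--     "SAM4=Special Air Mission", "SAM5=Special Air Mission",
--     "SAM6=Special Air Mission", "SAM7=Special Air Mission",
--     "SAM8=Special Air Mission", "SAM9=Special Air Mission",
--     "EXEC1=Executive Flight", "VENUS=USAF KC-135",
--     "PACK=USMC Airlift", "EVAC=Aeromedical Evacuation",
-- )
--
-- _PREFIX_MAP = {}
-- for _item in _MIL_DATA: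
--     _key, _desc = _item.split("=", 1)
--     _PREFIX_MAP[_key] = _desc
-- _MAX_LEN = max(len(_key) for _key in _PREFIX_MAP)
--
--
-- def classify_military_callsign(callsign: str):
--     head = ""
--     for ch in callsign.strip().upper()[:_MAX_LEN]:
--         head += ch
--         desc = _PREFIX_MAP.get(head)
--         if desc is not None:
--             return (head, desc)
--     return None
-- ===== Notes on version B (the rewrite author's own statement) =====
-- stated objective: alternative
-- what changed: B stores the table as packed prefix-description records parsed once into a hash map and classifies by walking the first few characters of the callsign (up to the longest prefix length), growing a candidate head with one incremental dict lookup per character, instead of A's linear scan over the 40 prefixes with startswith; equal because no listed prefix is a prefix of another, so at most one prefix can match.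
import Mathlib
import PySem

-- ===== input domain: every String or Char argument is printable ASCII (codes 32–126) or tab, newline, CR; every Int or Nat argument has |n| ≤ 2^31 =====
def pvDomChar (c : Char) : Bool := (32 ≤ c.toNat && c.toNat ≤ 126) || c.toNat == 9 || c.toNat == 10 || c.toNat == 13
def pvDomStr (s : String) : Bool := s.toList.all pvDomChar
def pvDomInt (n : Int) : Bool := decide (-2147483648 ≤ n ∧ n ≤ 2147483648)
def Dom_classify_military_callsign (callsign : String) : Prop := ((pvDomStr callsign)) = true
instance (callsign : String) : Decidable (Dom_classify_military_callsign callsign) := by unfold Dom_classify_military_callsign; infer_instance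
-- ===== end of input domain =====

-- B stores the prefix table as packed records parsed once into a hash map and
-- classifies by walking the first (max prefix length) characters of the callsign
-- with incremental lookups (correct since no listed prefix is a prefix of another).

-- ===== PORT A =====
def MIL_CALLSIGN_PREFIXES : List (String × String) := [
  ("RCH", "US Military Airlift"), ("REACH", "US Military Airlift"),
  ("DOOM", "B-52/Bomber"), ("DEATH", "B-52/Bomber"),
  ("JAKE", "Tanker/Strategic"), ("NUKE", "Tanker/Strategic"),
  ("EPIC", "Mil Callsign"), ("IRON", "Mil Callsign"),
  ("NATO", "NATO"), ("FORTE", "Global Hawk ISR"),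
  ("DUKE", "US Army"), ("MOOSE", "C-17 Airlift"),
  ("BISON", "C-5M Galaxy"), ("SNTRY", "E-3 AWACS"),
  ("DRAGN", "RC-135 Recon"), ("GORDO", "P-8A Poseidon"),
  ("PLNKN", "SIGINT"), ("TOPCT", "E-6B Mercury"),
  ("SCORE", "Strategic Tanker"), ("HAVOC", "Attack Helo"),
  ("VIPER", "F-16/Fighter"), ("RAPTOR", "F-22"),
  ("BONES", "B-1B Lancer"), ("GHOST", "B-2 Spirit"),
  ("SPAR", "USAF VIP/Government"),
  ("SAM0", "Special Air Mission"), ("SAM1", "Special Air Mission"),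
  ("SAM2", "Special Air Mission"), ("SAM3", "Special Air Mission"),
  ("SAM4", "Special Air Mission"), ("SAM5", "Special Air Mission"),
  ("SAM6", "Special Air Mission"), ("SAM7", "Special Air Mission"),
  ("SAM8", "Special Air Mission"), ("SAM9", "Special Air Mission"),
  ("EXEC1", "Executive Flight"), ("VENUS", "USAF KC-135"),
  ("PACK", "USMC Airlift"), ("EVAC", "Aeromedical Evacuation")]

-- A's for-loop over the prefix list, in list order
def pvScanA (upper : String) : List (String × String) → Option (String × String)
  | [] => none
  | (p, d) :: rest =>
      if PySem.Str.startswith upper p then some (p, d) else pvScanA upper rest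

def classify_military_callsign (callsign : String) : Option (String × String) :=
  let upper := PySem.Str.upper (PySem.Str.strip callsign)
  if upper = "" then none
  else pvScanA upper MIL_CALLSIGN_PREFIXES

-- ===== PORT B =====
-- B's packed record table _MIL_DATA
def pvMilData : List String := [
  "RCH=US Military Airlift",
  "REACH=US Military Airlift",
  "DOOM=B-52/Bomber",
  "DEATH=B-52/Bomber",
  "JAKE=Tanker/Strategic",
  "NUKE=Tanker/Strategic",
  "EPIC=Mil Callsign",
  "IRON=Mil Callsign",
  "NATO=NATO",
  "FORTE=Global Hawk ISR",
  "DUKE=US Army",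
  "MOOSE=C-17 Airlift",
  "BISON=C-5M Galaxy",
  "SNTRY=E-3 AWACS",
  "DRAGN=RC-135 Recon",
  "GORDO=P-8A Poseidon",
  "PLNKN=SIGINT",
  "TOPCT=E-6B Mercury",
  "SCORE=Strategic Tanker",
  "HAVOC=Attack Helo",
  "VIPER=F-16/Fighter",
  "RAPTOR=F-22",
  "BONES=B-1B Lancer",
  "GHOST=B-2 Spirit",
  "SPAR=USAF VIP/Government",
  "SAM0=Special Air Mission",
  "SAM1=Special Air Mission",
  "SAM2=Special Air Mission",
  "SAM3=Special Air Mission",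
  "SAM4=Special Air Mission",
  "SAM5=Special Air Mission",
  "SAM6=Special Air Mission",
  "SAM7=Special Air Mission",
  "SAM8=Special Air Mission",
  "SAM9=Special Air Mission",
  "EXEC1=Executive Flight",
  "VENUS=USAF KC-135",
  "PACK=USMC Airlift",
  "EVAC=Aeromedical Evacuation"]

-- B's module-level loop: _PREFIX_MAP[key] = desc for each packed record.
-- The `| _ => m` arm covers record shapes on which Python's tuple unpacking
-- would raise; no record of the fixed data has that shape.
def pvPrefixMap : PySem.Dict String String :=
  pvMilData.foldl
    (fun m item =>
      match (PySem.Str.splitMax? item "=" 1).getD [] with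
      | [key, desc] => m.insert key desc
      | _ => m)
    PySem.Dict.empty

-- B's for-loop over the characters of the uppercased callsign, growing `head`
def pvScanB (m : PySem.Dict String String) (head : String) : List Char → Option (String × String)
  | [] => none
  | ch :: rest =>
      let head' := head.push ch
      match m.get? head' with
      | some desc => some (head', desc)
      | none => pvScanB m head' rest

-- _MAX_LEN = max(len(_key) for _key in _PREFIX_MAP); the map is nonempty, so
-- Python's max never raises and the getD 0 default is unreachable
def pvMaxLen : Int := (PySem.List.max? (pvPrefixMap.keys.map PySem.Str.len) (fun x => x)).getD 0

def classify_military_callsign_alt (callsign : String) : Option (String × String) :=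
  pvScanB pvPrefixMap ""
    (PySem.Str.slice (PySem.Str.upper (PySem.Str.strip callsign)) none (some pvMaxLen)).toList

-- ===== PRECONDITION & SPEC =====
def Spec_classify_military_callsign (callsign : String) (out : Option (String × String)) : Prop := out = classify_military_callsign_alt callsign
instance (callsign : String) (out : Option (String × String)) : Decidable (Spec_classify_military_callsign callsign out) := by unfold Spec_classify_military_callsign; infer_instance

-- ===== CLAIM (what is proved, stated in full; the proofs are below) =====
def Claim_equal_classify_military_callsign : Prop := ∀ (callsign : String), Dom_classify_military_callsign callsign → Spec_classify_military_callsign callsign (classify_military_callsign callsign)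

-- ===== LEMMAS AND PROOFS =====

-- no listed prefix is a (possibly improper) prefix of a different listed prefix
set_option maxRecDepth 40000 in
lemma pvKeyPrefix : ∀ pd ∈ MIL_CALLSIGN_PREFIXES, ∀ qd ∈ MIL_CALLSIGN_PREFIXES,
    pd.1.toList <+: qd.1.toList → pd = qd := by decide

-- parsing the packed records rebuilds exactly A's table (one kernel evaluation)
set_option maxRecDepth 100000 in
set_option maxHeartbeats 1000000 in
lemma pvMapEq : pvPrefixMap = PySem.Dict.mk MIL_CALLSIGN_PREFIXES :=
  PySem.Dict.ext (by decide)

lemma pvItems : pvPrefixMap.items = MIL_CALLSIGN_PREFIXES := by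
  rw [pvMapEq]

set_option maxRecDepth 40000 in
lemma pvGetSelf : ∀ pd ∈ MIL_CALLSIGN_PREFIXES, pvPrefixMap.get? pd.1 = some pd.2 := by
  rw [pvMapEq]; decide

lemma pvGetEmpty : pvPrefixMap.get? "" = none := by
  rw [pvMapEq]; decide

lemma pvMaxLen6 : pvMaxLen = 6 := by
  unfold pvMaxLen; rw [pvMapEq]; decide

set_option maxRecDepth 40000 in
lemma pvKeyLen : ∀ pd ∈ MIL_CALLSIGN_PREFIXES, pd.1.toList.length ≤ 6 := by decide

lemma pvSliceToList (u : String) {L : Int} (hL : 0 ≤ L) :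
    (PySem.Str.slice u none (some L)).toList = u.toList.take L.toNat := by
  simp [PySem.Str.toList_slice, PySem.Chars.slice_eq_listSlice, PySem.List.slice_to _ hL]

lemma pvGetMem {k v : String} (h : pvPrefixMap.get? k = some v) :
    (k, v) ∈ MIL_CALLSIGN_PREFIXES := by
  have := PySem.Dict.mem_items_of_get?_eq_some pvPrefixMap h
  rwa [pvItems] at this

lemma pvToListInj {s t : String} (h : s.toList = t.toList) : s = t := by
  have := congrArg String.ofList h
  rwa [String.ofList_toList, String.ofList_toList] at this

lemma pvScanA_none (u : String) (l : List (String × String))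
    (h : ∀ pd ∈ l, ¬ pd.1.toList <+: u.toList) : pvScanA u l = none := by
  induction l with
  | nil => rfl
  | cons pd rest ih =>
      obtain ⟨p, d⟩ := pd
      have hnp : ¬ PySem.Str.startswith u p = true := by
        rw [PySem.Str.startswith_eq, PySem.Chars.startswith_iff]
        exact h (p, d) (List.mem_cons_self ..)
      simp only [pvScanA]
      rw [if_neg hnp]
      exact ih (fun qd hq => h qd (List.mem_cons_of_mem _ hq))

lemma pvScanA_some (u : String) (l : List (String × String)) (pd : String × String)
    (hmem : pd ∈ l) (hm : pd.1.toList <+: u.toList)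
    (huniq : ∀ qd ∈ l, qd.1.toList <+: u.toList → qd = pd) : pvScanA u l = some pd := by
  induction l with
  | nil => cases hmem
  | cons qd rest ih =>
      obtain ⟨q, e⟩ := qd
      simp only [pvScanA]
      by_cases hq : PySem.Str.startswith u q = true
      · rw [if_pos hq]
        have : ((q, e) : String × String) = pd := by
          apply huniq (q, e) (List.mem_cons_self ..)
          rw [PySem.Str.startswith_eq, PySem.Chars.startswith_iff] at hq
          exact hq
        rw [this]
      · rw [if_neg hq]
        have hne : pd ≠ (q, e) := by
          rintro rfl
          exact hq (by rw [PySem.Str.startswith_eq, PySem.Chars.startswith_iff]; exact hm)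
        exact ih (List.mem_of_ne_of_mem hne hmem)
          (fun rd hr hrp => huniq rd (List.mem_cons_of_mem _ hr) hrp)

lemma pvScanB_none (rest : List Char) : ∀ (head : String),
    (∀ pd ∈ MIL_CALLSIGN_PREFIXES, ¬ pd.1.toList <+: head.toList ++ rest) →
    pvScanB pvPrefixMap head rest = none := by
  induction rest with
  | nil => intro head _; rfl
  | cons ch rest' ih =>
      intro head h
      simp only [pvScanB]
      cases hget : pvPrefixMap.get? (head.push ch) with
      | some desc =>
          exfalso
          refine h _ (pvGetMem hget) ?_
          rw [String.toList_push]
          exact ⟨rest', by simp⟩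
      | none =>
          exact ih (head.push ch)
            (fun pd hpd => by
              rw [String.toList_push, List.append_assoc]
              exact h pd hpd)

lemma pvScanB_some (rest : List Char) : ∀ (head : String) (pre : List Char)
    (pd : String × String), pd ∈ MIL_CALLSIGN_PREFIXES →
    pd.1.toList = head.toList ++ pre → pre <+: rest →
    pvPrefixMap.get? head = none →
    (∀ qd ∈ MIL_CALLSIGN_PREFIXES, qd.1.toList <+: head.toList ++ rest → qd = pd) →
    pvScanB pvPrefixMap head rest = some pd := by
  induction rest with
  | nil =>
      intro head pre pd hmem heq hpre hnone _
      exfalso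
      rw [List.prefix_nil] at hpre
      subst hpre
      rw [List.append_nil] at heq
      have : pd.1 = head := pvToListInj heq
      rw [← this, pvGetSelf pd hmem] at hnone
      cases hnone
  | cons ch rest' ih =>
      intro head pre pd hmem heq hpre hnone huniq
      simp only [pvScanB]
      cases hget : pvPrefixMap.get? (head.push ch) with
      | some desc =>
          have : (head.push ch, desc) = pd := by
            refine huniq _ (pvGetMem hget) ?_
            rw [String.toList_push]
            exact ⟨rest', by simp⟩
          show some (head.push ch, desc) = some pd
          rw [this]
      | none =>
          cases pre with
          | nil =>
              exfalso
              rw [List.append_nil] at heq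
              have : pd.1 = head := pvToListInj heq
              rw [← this, pvGetSelf pd hmem] at hnone
              cases hnone
          | cons c pre' =>
              obtain ⟨hc, hpre'⟩ := List.cons_prefix_cons.mp hpre
              subst hc
              refine ih (head.push c) pre' pd hmem ?_ hpre' hget ?_
              · rw [String.toList_push, List.append_assoc]
                simpa using heq
              · intro qd hq hqp
                refine huniq qd hq ?_
                rw [String.toList_push, List.append_assoc] at hqp
                simpa using hqp

-- ===== VERDICT (by name: the statement is the Claim_ definition above) =====
theorem classify_military_callsign_spec : Claim_equal_classify_military_callsign := by
  intro callsign _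
  unfold Spec_classify_military_callsign classify_military_callsign classify_military_callsign_alt
  set u := PySem.Str.upper (PySem.Str.strip callsign) with hu
  have hslice : (PySem.Str.slice u none (some pvMaxLen)).toList = u.toList.take 6 := by
    rw [pvSliceToList u (L := pvMaxLen) (by rw [pvMaxLen6]; norm_num), pvMaxLen6]
    rfl
  rw [hslice]
  by_cases hemp : u = ""
  · rw [if_pos hemp, hemp]
    rfl
  · rw [if_neg hemp]
    by_cases h : ∃ pd ∈ MIL_CALLSIGN_PREFIXES, pd.1.toList <+: u.toList
    · obtain ⟨pd, hmem, hm⟩ := h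
      have huniq : ∀ qd ∈ MIL_CALLSIGN_PREFIXES, qd.1.toList <+: u.toList → qd = pd := by
        intro qd hq hqp
        rcases (List.prefix_or_prefix_of_prefix hqp hm) with hc | hc
        · exact pvKeyPrefix qd hq pd hmem hc
        · exact (pvKeyPrefix pd hmem qd hq hc).symm
      have hm6 : pd.1.toList <+: u.toList.take 6 :=
        List.prefix_take_iff.mpr ⟨hm, pvKeyLen pd hmem⟩
      rw [pvScanA_some u _ pd hmem hm huniq]
      rw [pvScanB_some (u.toList.take 6) "" pd.1.toList pd hmem (by simp) hm6 pvGetEmpty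
            (by
              intro qd hq hqp
              refine huniq qd hq ?_
              simp only [String.toList_empty, List.nil_append] at hqp
              exact (List.prefix_take_iff.mp hqp).1)]
    · push Not at h
      rw [pvScanA_none u _ h,
          pvScanB_none (u.toList.take 6) ""
            (by
              intro qd hq hqp
              refine h qd hq ?_
              simp only [String.toList_empty, List.nil_append] at hqp
              exact (List.prefix_take_iff.mp hqp).1)]
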